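-- pv_equiv track=rewrite | github.com/KristinaPilipets/funktsioonid | module1.py | XOR_uncipher
-- ===== SOURCE A (Python) =====
-- def XOR_uncipher(string:str,key:str)->str:
-- 	"""Kodeeritud text dekodeeritakse
-- 	:param str string: koderivad tekst
-- 	:param str key: võti
-- 	:rtype str: tagastab dekoderita teksti
-- 	"""
-- 	result=""
-- 	temp=[]
-- 	for i in range(len(string)):#определяем кол-во символов
-- 		temp.append(string[i])
-- 		for j in reversed(range(len(key))):#в обратном порядке ставим буквы
-- 			temp[i]=chr(ord(key[j])^ord(temp[i]))
-- 		result+=temp[i]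
-- 	return result
-- ===== SOURCE B (Python) =====
-- def XOR_uncipher(string: str, key: str) -> str:
--     """XOR-decipher: fold the key's XOR once, then apply it to each character (O(n+m))."""
--     k = 0
--     for ch in key:
--         k ^= ord(ch)
--     return ''.join(chr(ord(c) ^ k) for c in string)
-- ===== Notes on version B (the rewrite author's own statement) =====
-- stated objective: faster
-- what changed: B precomputes the XOR-fold of the whole key once and XORs each character of the string with it once, instead of A's inner loop over every key character for every string character.
import Mathlib
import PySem

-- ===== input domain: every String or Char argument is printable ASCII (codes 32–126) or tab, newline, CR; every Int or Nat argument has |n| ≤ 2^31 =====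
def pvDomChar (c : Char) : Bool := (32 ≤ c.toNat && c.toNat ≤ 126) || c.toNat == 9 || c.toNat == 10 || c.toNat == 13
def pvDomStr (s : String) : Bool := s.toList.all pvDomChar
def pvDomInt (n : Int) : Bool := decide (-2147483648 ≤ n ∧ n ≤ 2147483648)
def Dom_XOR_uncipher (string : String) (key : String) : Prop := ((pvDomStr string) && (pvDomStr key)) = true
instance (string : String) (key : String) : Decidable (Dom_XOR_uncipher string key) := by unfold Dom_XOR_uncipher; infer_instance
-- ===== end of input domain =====

-- B replaces A's inner loop over the key (per string character) by a single precomputed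
-- XOR-fold of the key applied once per character: O(n+m) instead of O(n*m).

-- ===== PORT A =====
-- A: for each character of `string`, XOR it successively with every key character,
-- taken in reversed order, appending the resulting character to `result`.
def XOR_uncipher (string : String) (key : String) : String :=
  String.ofList (string.toList.foldl
    (fun result c =>
      result ++ [key.toList.reverse.foldl
        (fun t k => Char.ofNat (k.toNat ^^^ t.toNat)) c])
    [])

-- ===== PORT B =====
-- B: fold the key's XOR once, then apply it to each character.
def XOR_uncipher_alt (string : String) (key : String) : String :=
  let k := key.toList.foldl (fun a ch => a ^^^ ch.toNat) 0
  String.ofList (string.toList.map (fun c => Char.ofNat (k ^^^ c.toNat)))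

-- ===== PRECONDITION & SPEC =====
def Spec_XOR_uncipher (string : String) (key : String) (out : String) : Prop := out = XOR_uncipher_alt string key
instance (string : String) (key : String) (out : String) : Decidable (Spec_XOR_uncipher string key out) := by unfold Spec_XOR_uncipher; infer_instance

-- ===== CLAIM (what is proved, stated in full; the proofs are below) =====
def Claim_equal_XOR_uncipher : Prop := ∀ (string : String) (key : String), Dom_XOR_uncipher string key → Spec_XOR_uncipher string key (XOR_uncipher string key)

-- ===== LEMMAS AND PROOFS =====

-- chr ∘ ord roundtrip below the surrogate range
theorem toNat_ofNat_of_lt (n : Nat) (h : n < 55296) : (Char.ofNat n).toNat = n := by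
  have hv : Nat.isValidChar n := Or.inl (by omega)
  rw [Char.ofNat, dif_pos hv]
  simp [Char.toNat, Char.ofNatAux]

-- Nat-level XOR fold: peeling the seed off
theorem foldl_xor_seed (l : List Nat) (t : Nat) :
    l.foldl (· ^^^ ·) t = (l.foldl (· ^^^ ·) 0) ^^^ t := by
  induction l generalizing t with
  | nil => simp
  | cons x xs ih =>
    simp only [List.foldl_cons]
    rw [ih (t ^^^ x), ih (0 ^^^ x), Nat.zero_xor, Nat.xor_comm t x, ← Nat.xor_assoc]

-- XOR fold is reversal-invariant
theorem foldl_xor_reverse (l : List Nat) :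
    l.reverse.foldl (· ^^^ ·) 0 = l.foldl (· ^^^ ·) 0 := by
  induction l with
  | nil => rfl
  | cons x xs ih =>
    simp only [List.reverse_cons, List.foldl_append, List.foldl_cons, List.foldl_nil]
    rw [foldl_xor_seed xs (0 ^^^ x)]
    simp [ih, Nat.xor_comm]

-- A's inner loop over key characters equals a single Nat XOR fold, for codes < 128
theorem inner_loop_eq (ks : List Char) (t : Nat) (ht : t < 128)
    (hks : ∀ k ∈ ks, k.toNat < 128) :
    ks.foldl (fun t k => Char.ofNat (k.toNat ^^^ t.toNat)) (Char.ofNat t)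
      = Char.ofNat ((ks.map Char.toNat).foldl (· ^^^ ·) t) := by
  induction ks generalizing t with
  | nil => rfl
  | cons k ks ih =>
    have hk : k.toNat < 128 := hks k (List.mem_cons_self ..)
    have hrt : (Char.ofNat t).toNat = t := toNat_ofNat_of_lt t (by omega)
    have hx : k.toNat ^^^ t < 128 := Nat.xor_lt_two_pow (n := 7) hk ht
    simp only [List.foldl_cons, List.map_cons, hrt]
    rw [ih (k.toNat ^^^ t) hx (fun x hx' => hks x (List.mem_cons_of_mem _ hx'))]
    rw [Nat.xor_comm t k.toNat]

-- per-character agreement of the two programs, for ASCII-range codes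
theorem char_eq (ks : List Char) (c : Char) (hc : c.toNat < 128)
    (hks : ∀ k ∈ ks, k.toNat < 128) :
    ks.reverse.foldl (fun t k => Char.ofNat (k.toNat ^^^ t.toNat)) c
      = Char.ofNat ((ks.foldl (fun a ch => a ^^^ ch.toNat) 0) ^^^ c.toNat) := by
  have h1 : ks.foldl (fun a ch => a ^^^ ch.toNat) 0
      = (ks.map Char.toNat).foldl (· ^^^ ·) 0 := by
    rw [List.foldl_map]
  conv_lhs => rw [show c = Char.ofNat c.toNat from (Char.ofNat_toNat c).symm]
  rw [inner_loop_eq ks.reverse c.toNat hc (fun k hk => hks k (List.mem_reverse.mp hk))]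
  rw [show (ks.reverse.map Char.toNat) = (ks.map Char.toNat).reverse by simp]
  rw [foldl_xor_seed, foldl_xor_reverse, h1]

theorem dom_char_lt (c : Char) (h : pvDomChar c = true) : c.toNat < 128 := by
  simp [pvDomChar] at h
  omega

-- ===== VERDICT (by name: the statement is the Claim_ definition above) =====
theorem XOR_uncipher_spec : Claim_equal_XOR_uncipher := by
  intro s key hdom
  unfold Spec_XOR_uncipher XOR_uncipher XOR_uncipher_alt
  simp only [Dom_XOR_uncipher, Bool.and_eq_true, pvDomStr, List.all_eq_true] at hdom
  obtain ⟨hs, hk⟩ := hdom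
  rw [PySem.List.foldl_append_singleton_eq_map]
  congr 1
  apply List.map_congr_left
  intro c hc
  exact char_eq key.toList c (dom_char_lt c (hs c hc)) (fun k hk' => dom_char_lt k (hk k hk'))
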